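-- pv_equiv track=rewrite | github.com/lypnol/adventofcode-2019 | day-06/part-1/thore.py | get_number_of_orbits
-- ===== SOURCE A (Python) =====
-- from functools import lru_cache
--
-- def get_number_of_orbits(orbit_around):
--     @lru_cache(maxsize=None)
--     def get_number_of_orbits_for_planet(planet):
--         if planet == "COM":
--             return 0
--
--         return 1 + get_number_of_orbits_for_planet(orbit_around[planet])
--
--     return sum(
--         [get_number_of_orbits_for_planet(planet) for planet in orbit_around.keys()]
--     )
-- ===== SOURCE B (Python) =====
-- def get_number_of_orbits(orbit_around):
--     total = 0
--     for planet in orbit_around: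
--         cur = planet
--         while cur != "COM":
--             cur = orbit_around[cur]
--             total += 1
--     return total
-- ===== Notes on version B (the rewrite author's own statement) =====
-- stated objective: simpler
-- what changed: Replaced the lru_cache-memoized recursion with an explicit iterative walk-up: for each planet follow the parent chain to COM, adding one step at a time to a running total.
import Mathlib
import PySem

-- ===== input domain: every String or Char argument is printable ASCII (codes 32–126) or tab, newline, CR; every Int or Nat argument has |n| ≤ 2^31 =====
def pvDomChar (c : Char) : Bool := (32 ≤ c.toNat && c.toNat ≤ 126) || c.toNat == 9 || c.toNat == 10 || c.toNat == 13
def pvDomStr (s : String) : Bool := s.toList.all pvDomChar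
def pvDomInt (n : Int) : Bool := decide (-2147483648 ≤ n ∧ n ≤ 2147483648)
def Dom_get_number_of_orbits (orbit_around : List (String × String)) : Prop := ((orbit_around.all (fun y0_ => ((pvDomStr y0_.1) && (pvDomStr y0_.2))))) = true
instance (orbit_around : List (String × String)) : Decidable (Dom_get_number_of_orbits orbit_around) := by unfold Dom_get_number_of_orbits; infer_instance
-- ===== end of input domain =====

-- B replaces A's lru_cache-memoized recursion by an explicit per-planet iterative walk-up to "COM" with a running total (simpler; same results on all inputs where A returns).


-- ===== PORT A =====
-- A's inner recursion get_number_of_orbits_for_planet; fuel (number of dict keys + 1)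
-- only makes the recursion total: under Pre_ it never runs out (chains are acyclic,
-- so depth ≤ number of keys). none = Python raising (KeyError / unbounded recursion).
def pvDepthA (d : PySem.Dict String String) (p : String) : Nat → Option Int
  | 0 => none
  | f + 1 =>
    if p == "COM" then some 0
    else
      match d.get? p with
      | none => none
      | some q => (pvDepthA d q f).map (1 + ·)

def get_number_of_orbits (orbit_around : List (String × String)) : Int :=
  let d := PySem.Dict.ofList orbit_around
  ((d.keys.map (fun p => (pvDepthA d p (d.size + 1)).getD 0)).sum)

-- ===== PORT B =====
-- B's while loop: walk up the parent chain, incrementing the running total.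
-- Same fuel device; the default "COM" in getD is unreachable under Pre_.
def pvWalkB (d : PySem.Dict String String) (cur : String) (total : Int) : Nat → Int
  | 0 => total
  | f + 1 =>
    if cur == "COM" then total
    else pvWalkB d (d.getD cur "COM") (total + 1) f

def get_number_of_orbits_alt (orbit_around : List (String × String)) : Int :=
  let d := PySem.Dict.ofList orbit_around
  d.keys.foldl (fun total p => pvWalkB d p total (d.size + 1)) 0

-- ===== PRECONDITION & SPEC =====
-- The parent map of the input graph (a missing key is a fixed point, never "COM").
def pvStep (d : PySem.Dict String String) (x : String) : String := d.getD x x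

-- Pre_ excludes exactly the inputs on which A raises: a planet with some ancestor
-- not equal to "COM" and absent from the dict (KeyError), or on a cycle
-- (unbounded recursion). Equivalently: every planet has "COM" among its first
-- `size` ancestors (an acyclic chain reaching COM has length ≤ number of keys).
def Pre_get_number_of_orbits (orbit_around : List (String × String)) : Prop :=
  ∀ p ∈ (PySem.Dict.ofList orbit_around).keys,
    ∃ n ≤ (PySem.Dict.ofList orbit_around).size,
      (pvStep (PySem.Dict.ofList orbit_around))^[n] p = "COM"
instance (orbit_around : List (String × String)) : Decidable (Pre_get_number_of_orbits orbit_around) := by unfold Pre_get_number_of_orbits; infer_instance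

def pvWitness_get_number_of_orbits : (List (String × String)) := [("A", "COM"), ("B", "A")]

def Spec_get_number_of_orbits (orbit_around : List (String × String)) (out : Int) : Prop := out = get_number_of_orbits_alt orbit_around
instance (orbit_around : List (String × String)) (out : Int) : Decidable (Spec_get_number_of_orbits orbit_around out) := by unfold Spec_get_number_of_orbits; infer_instance

-- ===== CLAIM (what is proved, stated in full; the proofs are below) =====
def Claim_equal_get_number_of_orbits : Prop := ∀ (orbit_around : List (String × String)), Dom_get_number_of_orbits orbit_around → Pre_get_number_of_orbits orbit_around → Spec_get_number_of_orbits orbit_around (get_number_of_orbits orbit_around)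

-- ===== LEMMAS AND PROOFS =====

-- Proof-side reachability predicate (recursion following actual dict edges).
def pvReaches (d : PySem.Dict String String) (p : String) : Nat → Bool
  | 0 => false
  | f + 1 =>
    p == "COM" ||
      (match d.get? p with
       | none => false
       | some q => pvReaches d q f)

theorem pvReaches_mono (d : PySem.Dict String String) (p : String) (f f' : Nat)
    (hle : f ≤ f') (h : pvReaches d p f = true) : pvReaches d p f' = true := by
  induction f generalizing p f' with
  | zero => simp [pvReaches] at h
  | succ f ih =>
    obtain ⟨f'', rfl⟩ : ∃ f'', f' = f'' + 1 := ⟨f' - 1, by omega⟩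
    simp only [pvReaches] at h ⊢
    by_cases hp : p == "COM"
    · simp [hp]
    · simp only [hp, Bool.false_or] at h ⊢
      cases hq : d.get? p with
      | none => simp [hq] at h
      | some q =>
        simp only [hq] at h ⊢
        exact ih q f'' (by omega) h

theorem pvReaches_of_iter (d : PySem.Dict String String) (n : Nat) (p : String)
    (h : (pvStep d)^[n] p = "COM") : pvReaches d p (n + 1) = true := by
  induction n generalizing p with
  | zero =>
    simp only [Function.iterate_zero, id] at h
    simp [pvReaches, h]
  | succ n ih =>
    by_cases hp : p = "COM"
    · simp [pvReaches, hp]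
    · rw [Function.iterate_succ_apply] at h
      cases hq : d.get? p with
      | none =>
        have hstep : pvStep d p = p := by
          simp [pvStep, PySem.Dict.getD_eq_get?_getD, hq]
        rw [hstep] at h
        exact pvReaches_mono d p (n + 1) (n + 2) (by omega) (ih p h)
      | some q =>
        have hstep : pvStep d p = q := by
          simp [pvStep, PySem.Dict.getD_eq_get?_getD, hq]
        rw [hstep] at h
        have hr := ih q h
        show (p == "COM" ||
          (match d.get? p with
           | none => false
           | some q' => pvReaches d q' (n + 1))) = true
        rw [hq]
        simp [hr]

theorem pvDepthA_isSome_of_reaches (d : PySem.Dict String String) (p : String) (f : Nat)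
    (h : pvReaches d p f = true) : (pvDepthA d p f).isSome := by
  induction f generalizing p with
  | zero => simp [pvReaches] at h
  | succ f ih =>
    simp only [pvReaches] at h
    simp only [pvDepthA]
    by_cases hp : p == "COM"
    · simp [hp]
    · simp only [hp, Bool.false_or] at h
      simp only [hp, Bool.false_eq_true]
      cases hq : d.get? p with
      | none => simp [hq] at h
      | some q =>
        simp only [hq] at h ⊢
        simpa using ih q h

theorem pvWalkB_eq (d : PySem.Dict String String) (p : String) (total : Int) (f : Nat)
    (h : pvReaches d p f = true) :
    pvWalkB d p total f = total + (pvDepthA d p f).getD 0 := by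
  induction f generalizing p total with
  | zero => simp [pvReaches] at h
  | succ f ih =>
    simp only [pvReaches] at h
    simp only [pvWalkB, pvDepthA]
    by_cases hp : p == "COM"
    · simp [hp]
    · simp only [hp, Bool.false_or] at h
      simp only [hp, Bool.false_eq_true]
      cases hq : d.get? p with
      | none => simp [hq] at h
      | some q =>
        simp only [hq] at h ⊢
        have hd : d.getD p "COM" = q := by
          simp [PySem.Dict.getD_eq_get?_getD, hq]
        rw [hd, ih q (total + 1) h]
        obtain ⟨m, hm⟩ := Option.isSome_iff_exists.mp (pvDepthA_isSome_of_reaches d q f h)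
        rw [hm]
        simp
        ring

theorem foldl_walk (d : PySem.Dict String String) (F : Nat) (ks : List String) (total : Int)
    (h : ∀ p ∈ ks, pvReaches d p F = true) :
    ks.foldl (fun total p => pvWalkB d p total F) total
      = total + (ks.map (fun p => (pvDepthA d p F).getD 0)).sum := by
  induction ks generalizing total with
  | nil => simp
  | cons k ks ih =>
    simp only [List.foldl_cons, List.map_cons, List.sum_cons]
    rw [pvWalkB_eq d k total F (h k (by simp)), ih _ (fun p hp => h p (by simp [hp]))]
    ring

-- ===== VERDICT (by name: the statement is the Claim_ definition above) =====
theorem get_number_of_orbits_spec : Claim_equal_get_number_of_orbits := by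
  intro l _ hpre
  unfold Spec_get_number_of_orbits get_number_of_orbits get_number_of_orbits_alt
  rw [foldl_walk _ _ _ _ (fun p hp => by
    obtain ⟨n, hn, hiter⟩ := hpre p hp
    exact pvReaches_mono _ p (n + 1) _ (by omega) (pvReaches_of_iter _ n p hiter))]
  simp
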